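-- pv_equiv track=rewrite | github.com/LeAnhTuanIT/LeAnhTuanIT | .github/scripts/cowsay.py | make_cowsay
-- ===== SOURCE A (Python) =====
-- def wrap_text(text, max_width=48):
--     words = text.split()
--     lines = []
--     current = ""
--     for word in words:
--         if len(current) + len(word) + 1 <= max_width:
--             current += (" " if current else "") + word
--         else:
--             if current:
--                 lines.append(current)
--             current = word
--     if current:
--         lines.append(current)
--     return lines
--
-- def make_cowsay(text):
--     lines = wrap_text(text)
--     max_len = max(len(l) for l in lines)
--     lines = [l.ljust(max_len) for l in lines]
--
--     result = [" " + "_" * (max_len + 2)]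
--     if len(lines) == 1:
--         result.append(f"< {lines[0]} >")
--     else:
--         result.append(f"/ {lines[0]} \\")
--         for l in lines[1:-1]:
--             result.append(f"| {l} |")
--         result.append(f"\\ {lines[-1]} /")
--     result.append(" " + "-" * (max_len + 2))
--     result.extend([
--         "        \\   ^__^",
--         "         \\  (oo)\\_______",
--         "            (__)\\       )\\/\\",
--         "                ||----w |",
--         "                ||     ||",
--     ])
--     return result
-- ===== SOURCE B (Python) =====
-- def make_cowsay(text):
--     # wrap: outer loop takes one line at a time, inner loop greedily fills it
--     words = text.split()
--     lines = []
--     i = 0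
--     while i < len(words):
--         line = words[i]
--         i += 1
--         while i < len(words) and len(line) + len(words[i]) + 1 <= 48:
--             line += " " + words[i]
--             i += 1
--         lines.append(line)
--     width = max(len(l) for l in lines)
--     n = len(lines)
--
--     def row(k, l):
--         l = l.ljust(width)
--         if n == 1:
--             return "< " + l + " >"
--         if k == 0:
--             return "/ " + l + " \\"
--         if k == n - 1:
--             return "\\ " + l + " /"
--         return "| " + l + " |"
--
--     return (
--         [" " + "_" * (width + 2)]
--         + [row(k, l) for k, l in enumerate(lines)]
--         + [" " + "-" * (width + 2)]
--         + [
--             "        \\   ^__^",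
--             "         \\  (oo)\\_______",
--             "            (__)\\       )\\/\\",
--             "                ||----w |",
--             "                ||     ||",
--         ]
--     )
-- ===== Notes on version B (the rewrite author's own statement) =====
-- stated objective: alternative
-- what changed: B replaces A's fold-per-word wrapping with a `current` accumulator and final flush by a two-level loop (outer loop emits one line, inner loop greedily consumes the words that fit), and replaces A's branch-on-line-count body assembly with slicing [1:-1] by a per-index row formatter chosen from the line's position.
import Mathlib
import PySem

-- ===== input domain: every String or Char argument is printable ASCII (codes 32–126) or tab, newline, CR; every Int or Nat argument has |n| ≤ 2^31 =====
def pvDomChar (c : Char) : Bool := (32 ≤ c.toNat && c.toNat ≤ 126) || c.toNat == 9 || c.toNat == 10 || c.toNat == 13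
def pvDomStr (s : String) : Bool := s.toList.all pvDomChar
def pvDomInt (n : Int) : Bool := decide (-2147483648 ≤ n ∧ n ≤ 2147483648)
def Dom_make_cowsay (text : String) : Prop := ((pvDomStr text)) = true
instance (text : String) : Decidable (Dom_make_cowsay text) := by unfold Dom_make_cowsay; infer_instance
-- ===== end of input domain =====

-- B wraps with a two-level loop (outer per line, inner greedily filling it) instead of A's
-- fold-per-word accumulator, and formats each bubble row from its index instead of A's
-- branch-on-line-count assembly with slicing (objective: alternative decomposition; same cost).

-- ===== PORT A =====
-- helper wrap_text of A's Python, a fold per word over (lines, current);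
-- strings are handled as List Char and rebuilt with String.ofList (exact).
def wrapStep (mw : Nat) (st : List (List Char) × List Char) (word : List Char) :
    List (List Char) × List Char :=
  if st.2.length + word.length + 1 ≤ mw then
    (st.1, st.2 ++ (if st.2 = [] then [] else [' ']) ++ word)
  else
    ((if st.2 = [] then st.1 else st.1 ++ [st.2]), word)

def wrapText (text : String) (mw : Nat) : List (List Char) :=
  let st := (PySem.Chars.split₀ text.toList).foldl (wrapStep mw) ([], [])
  if st.2 = [] then st.1 else st.1 ++ [st.2]

-- the fixed cow picture (shared constant)
def cowTail : List String :=
  ["        \\   ^__^",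
   "         \\  (oo)\\_______",
   "            (__)\\       )\\/\\",
   "                ||----w |",
   "                ||     ||"]

-- body of A's make_cowsay after wrapping (helper; steps as in the Python)
def bubbleA (lines0 : List (List Char)) : List String :=
  let lines := lines0
  match PySem.List.max? (lines.map (fun l => l.length)) (fun n => n) with
  | none => []   -- Python: max() on an empty sequence raises ValueError; excluded by Pre_
  | some maxLen =>
    let lines := lines.map (fun l => l ++ List.replicate (maxLen - l.length) ' ')
    let result := [[' '] ++ List.replicate (maxLen + 2) '_']
    let result :=
      if lines.length = 1 then
        result ++ [['<', ' '] ++ PySem.List.pyGetD lines 0 [] ++ [' ', '>']]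
      else
        result ++ [['/', ' '] ++ PySem.List.pyGetD lines 0 [] ++ [' ', '\\']]
          ++ (PySem.List.slice lines (some 1) (some (-1))).map
               (fun l => ['|', ' '] ++ l ++ [' ', '|'])
          ++ [['\\', ' '] ++ PySem.List.pyGetD lines (-1) [] ++ [' ', '/']]
    let result := result ++ [[' '] ++ List.replicate (maxLen + 2) '-']
    result.map String.ofList ++ cowTail

def make_cowsay (text : String) : List String :=
  bubbleA (wrapText text 48)

-- ===== PORT B =====
-- inner while loop of Source B: append further words to `line` while they fit
def fillLine (line : List Char) (ws : List (List Char)) : List Char × List (List Char) :=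
  match ws with
  | [] => (line, [])
  | w :: rest =>
    if line.length + w.length + 1 ≤ 48 then fillLine (line ++ ' ' :: w) rest
    else (line, w :: rest)

theorem fillLine_rest_le (line : List Char) (ws : List (List Char)) :
    (fillLine line ws).2.length ≤ ws.length := by
  induction ws generalizing line with
  | nil => simp [fillLine]
  | cons w rest ih =>
    simp only [fillLine]
    split
    · exact le_trans (ih _) (by simp)
    · simp

-- outer while loop of Source B: each iteration takes the next word and fills one line
def wrapB (ws : List (List Char)) : List (List Char) :=
  match ws with
  | [] => []
  | w :: rest =>
    let p := fillLine w rest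
    p.1 :: wrapB p.2
termination_by ws.length
decreasing_by
  exact Nat.lt_succ_of_le (fillLine_rest_le w rest)

-- Source B's `row(k, l)`: pad, then choose delimiters from the row's index
def padRow (width n : Nat) (k : Int) (l : List Char) : List Char :=
  let lp := l ++ List.replicate (width - l.length) ' '
  if n = 1 then ['<', ' '] ++ lp ++ [' ', '>']
  else if k = 0 then ['/', ' '] ++ lp ++ [' ', '\\']
  else if k = (n : Int) - 1 then ['\\', ' '] ++ lp ++ [' ', '/']
  else ['|', ' '] ++ lp ++ [' ', '|']

-- body of Source B's make_cowsay after wrapping (helper; steps as in the Python)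
def bubbleB (lines0 : List (List Char)) : List String :=
  let lines := lines0
  match PySem.List.max? (lines.map (fun l => l.length)) (fun n => n) with
  | none => []   -- Python: max() on an empty sequence raises ValueError; excluded by Pre_
  | some width =>
    let n := lines.length
    ([[' '] ++ List.replicate (width + 2) '_']
      ++ (PySem.List.enumerate lines).map (fun p => padRow width n p.1 p.2)
      ++ [[' '] ++ List.replicate (width + 2) '-']).map String.ofList ++ cowTail

def make_cowsay_alt (text : String) : List String :=
  bubbleB (wrapB (PySem.Chars.split₀ text.toList))

-- ===== PRECONDITION & SPEC =====
-- Pre_ excludes empty/whitespace-only text, on which A's max() raises ValueError (B raises there too).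
def Pre_make_cowsay (text : String) : Prop := PySem.Chars.split₀ text.toList ≠ []
instance (text : String) : Decidable (Pre_make_cowsay text) := by
  unfold Pre_make_cowsay; infer_instance
def pvWitness_make_cowsay : String := "hello world"
def Spec_make_cowsay (text : String) (out : List String) : Prop := out = make_cowsay_alt text
instance (text : String) (out : List String) : Decidable (Spec_make_cowsay text out) := by
  unfold Spec_make_cowsay; infer_instance

-- ===== CLAIM (what is proved, stated in full; the proofs are below) =====
def Claim_equal_make_cowsay : Prop :=
  ∀ (text : String), Dom_make_cowsay text → Pre_make_cowsay text →
    Spec_make_cowsay text (make_cowsay text)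

-- ===== LEMMAS AND PROOFS =====

-- every word produced by split() is nonempty
theorem split₀_go_ne_nil (s : List Char) : ∀ (cur : List Char) (acc : List (List Char)),
    (∀ w ∈ acc, w ≠ []) → ∀ w ∈ PySem.Chars.split₀.go s cur acc, w ≠ [] := by
  induction s with
  | nil =>
    intro cur acc hacc w hw
    simp only [PySem.Chars.split₀.go] at hw
    split at hw
    · exact hacc w (by simpa using hw)
    · rename_i hcur
      simp only [List.mem_reverse, List.mem_cons] at hw
      rcases hw with h | h
      · subst h; simpa using fun h => hcur (by simp [h])
      · exact hacc w (by simpa using h)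
  | cons c rest ih =>
    intro cur acc hacc w hw
    simp only [PySem.Chars.split₀.go] at hw
    split at hw
    · split at hw
      · exact ih [] acc hacc w hw
      · rename_i hcur
        refine ih [] _ ?_ w hw
        intro u hu
        rcases List.mem_cons.mp hu with h | h
        · subst h; simpa using fun h => hcur (by simp [h])
        · exact hacc u h
    · exact ih (c :: cur) acc hacc w hw

theorem mem_split₀_ne_nil {cs : List Char} {w : List Char}
    (h : w ∈ PySem.Chars.split₀ cs) : w ≠ [] :=
  split₀_go_ne_nil cs [] [] (by simp) w h

-- unfolding equation for the WF-recursive wrapB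
theorem wrapB_cons (w : List Char) (ws : List (List Char)) :
    wrapB (w :: ws) = (fillLine w ws).1 :: wrapB (fillLine w ws).2 := by
  rw [wrapB]

-- A's fold with flush, started from a nonempty current, equals B's line-at-a-time recursion
theorem foldl_wrap_eq_wrapB (ws : List (List Char)) (hws : ∀ u ∈ ws, u ≠ []) :
    ∀ (acc : List (List Char)) (cur : List Char), cur ≠ [] →
    (let st := ws.foldl (wrapStep 48) (acc, cur);
     if st.2 = [] then st.1 else st.1 ++ [st.2])
    = acc ++ (fillLine cur ws).1 :: wrapB (fillLine cur ws).2 := by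
  induction ws with
  | nil =>
    intro acc cur hcur
    simp [fillLine, wrapB, hcur]
  | cons w rest ih =>
    have hws' : ∀ u ∈ rest, u ≠ [] := fun u hu => hws u (List.mem_cons_of_mem w hu)
    intro acc cur hcur
    simp only [List.foldl_cons, fillLine]
    by_cases h : cur.length + w.length + 1 ≤ 48
    · have hstep : wrapStep 48 (acc, cur) w = (acc, cur ++ ' ' :: w) := by
        simp [wrapStep, h, hcur]
      rw [hstep, if_pos h, ih hws' acc (cur ++ ' ' :: w) (by simp)]
    · have hstep : wrapStep 48 (acc, cur) w = (acc ++ [cur], w) := by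
        simp [wrapStep, h, hcur]
      rw [hstep, if_neg h]
      have hw : w ≠ [] := hws w List.mem_cons_self
      rw [ih hws' (acc ++ [cur]) w hw, wrapB_cons]
      simp

-- the two wrapping loops agree
theorem wrapText_eq_wrapB (text : String) :
    wrapText text 48 = wrapB (PySem.Chars.split₀ text.toList) := by
  unfold wrapText
  rcases hw : PySem.Chars.split₀ text.toList with _ | ⟨w, ws⟩
  · simp [wrapB]
  · have hwne : w ≠ [] := mem_split₀_ne_nil (by rw [hw]; exact List.mem_cons_self)
    have hfirst : wrapStep 48 ([], []) w = ([], w) := by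
      unfold wrapStep; split <;> simp
    simp only [List.foldl_cons, hfirst]
    rw [foldl_wrap_eq_wrapB ws
      (fun u hu => mem_split₀_ne_nil (by rw [hw]; exact List.mem_cons_of_mem w hu))
      [] w hwne, wrapB_cons]
    simp

theorem wrapB_ne_nil (text : String) (h : PySem.Chars.split₀ text.toList ≠ []) :
    wrapB (PySem.Chars.split₀ text.toList) ≠ [] := by
  rcases hw : PySem.Chars.split₀ text.toList with _ | ⟨w, ws⟩
  · exact absurd hw h
  · rw [wrapB_cons]; simp

-- middle rows: every index strictly between 0 and n-1 formats with '|'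
theorem mid_rows (m n : Nat) (hn : 2 ≤ n) :
    ∀ (mid : List (List Char)) (s : Int), 1 ≤ s → s + mid.length ≤ (n : Int) - 1 →
    (PySem.List.enumerate mid s).map (fun p => padRow m n p.1 p.2)
    = mid.map (fun l => ['|', ' '] ++ (l ++ List.replicate (m - l.length) ' ') ++ [' ', '|']) := by
  intro mid
  induction mid with
  | nil => intro s _ _; simp [PySem.List.enumerate_nil]
  | cons l rest ih =>
    intro s hs hend
    rw [PySem.List.enumerate_cons]
    simp only [List.map_cons, List.length_cons] at *
    have h1 : padRow m n s l
        = ['|', ' '] ++ (l ++ List.replicate (m - l.length) ' ') ++ [' ', '|'] := by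
      unfold padRow
      rw [if_neg (by omega), if_neg (by omega), if_neg (by push_cast at hend ⊢; omega)]
    rw [h1, ih (s + 1) (by omega) (by push_cast at hend ⊢; omega)]

-- lines[1:-1] of a :: mid ++ [last] is mid
theorem slice_one_negone {a : Type} (x last : a) (mid : List a) :
    PySem.List.slice (x :: (mid ++ [last])) (some 1) (some (-1)) = mid := by
  simp only [PySem.List.slice, PySem.List.clampIdx]
  norm_num
  rw [if_neg (by omega)]
  simp

-- the two bubble builders agree on every nonempty line list
theorem bubbleA_eq_bubbleB (lines : List (List Char)) (hne : lines ≠ []) :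
    bubbleA lines = bubbleB lines := by
  unfold bubbleA bubbleB
  cases hm : PySem.List.max? (lines.map (fun l => l.length)) (fun n => n) with
  | none =>
    exact absurd ((PySem.List.max?_eq_none_iff _ _).mp hm) (by simpa using hne)
  | some m =>
    simp only [hm]
    congr 1
    rcases lines with _ | ⟨a, rest⟩
    · exact absurd rfl hne
    rcases List.eq_nil_or_concat rest with hr | ⟨mid, last, hr⟩
    · subst hr
      simp [PySem.List.pyGetD, PySem.List.pyGet?, PySem.List.pyIdx?,
        PySem.List.enumerate_cons, PySem.List.enumerate_nil, padRow]
    · rw [List.concat_eq_append] at hr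
      subst hr
      have hlen : (a :: (mid ++ [last])).length = mid.length + 2 := by simp
      rw [if_neg (by rw [List.length_map, hlen]; omega)]
      rw [show (a :: (mid ++ [last])).map
            (fun l => l ++ List.replicate (m - l.length) ' ')
          = (a ++ List.replicate (m - a.length) ' ')
            :: (mid.map (fun l => l ++ List.replicate (m - l.length) ' ')
              ++ [last ++ List.replicate (m - last.length) ' ']) by simp]
      rw [slice_one_negone]
      have hfirst : PySem.List.pyGetD
          ((a ++ List.replicate (m - a.length) ' ')
            :: (mid.map (fun l => l ++ List.replicate (m - l.length) ' ')
              ++ [last ++ List.replicate (m - last.length) ' '])) 0 []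
          = a ++ List.replicate (m - a.length) ' ' := by
        have h0 : (0 : Int) ≤ (mid.length : Int) + 1 := by omega
        simp [PySem.List.pyGetD, PySem.List.pyGet?, PySem.List.pyIdx?, h0]
      have hlast : PySem.List.pyGetD
          ((a ++ List.replicate (m - a.length) ' ')
            :: (mid.map (fun l => l ++ List.replicate (m - l.length) ' ')
              ++ [last ++ List.replicate (m - last.length) ' '])) (-1) []
          = last ++ List.replicate (m - last.length) ' ' := by
        simpa using PySem.List.pyGetD_neg_one_append_singleton
          (xs := (a ++ List.replicate (m - a.length) ' ')
            :: mid.map (fun l => l ++ List.replicate (m - l.length) ' '))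
          (x := last ++ List.replicate (m - last.length) ' ') (d := ([] : List Char))
      rw [hfirst, hlast]
      -- B side: unfold the enumeration
      rw [show PySem.List.enumerate (a :: (mid ++ [last])) 0
          = (0, a) :: (PySem.List.enumerate mid 1
            ++ [((1 : Int) + mid.length, last)]) by
        rw [PySem.List.enumerate_cons, PySem.List.enumerate_append,
          PySem.List.enumerate_cons, PySem.List.enumerate_nil]
        norm_num]
      have hn2 : (2 : Nat) ≤ (a :: (mid ++ [last])).length := by rw [hlen]; omega
      have hrow0 : padRow m (a :: (mid ++ [last])).length 0 a
          = ['/', ' '] ++ (a ++ List.replicate (m - a.length) ' ') ++ [' ', '\\'] := by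
        unfold padRow
        rw [if_neg (by rw [hlen]; omega), if_pos rfl]
      have hrowl : padRow m (a :: (mid ++ [last])).length ((1 : Int) + mid.length) last
          = ['\\', ' '] ++ (last ++ List.replicate (m - last.length) ' ') ++ [' ', '/'] := by
        unfold padRow
        rw [if_neg (by rw [hlen]; omega), if_neg (by omega),
          if_pos (by rw [hlen]; push_cast; omega)]
      conv_rhs => simp only [List.map_cons, List.map_append, List.map_singleton]
      rw [hrow0, hrowl,
        mid_rows m _ hn2 mid 1 (by omega) (by rw [hlen]; push_cast; omega)]
      simp [List.map_map, Function.comp]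

-- ===== VERDICT (by name: the statement is the Claim_ definition above) =====
theorem make_cowsay_spec : Claim_equal_make_cowsay := by
  intro text _ hpre
  unfold Spec_make_cowsay make_cowsay make_cowsay_alt
  rw [wrapText_eq_wrapB]
  exact bubbleA_eq_bubbleB _ (wrapB_ne_nil text hpre)
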